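-- pv_equiv track=rewrite | github.com/jjoshua2/arc_agi | dupes/97999447_group-056/test_correct/1695.py | transform
-- ===== SOURCE A (Python) =====
-- def transform(input_grid: list[list[int]]) -> list[list[int]]:
--     # Create a copy of the input grid
--     output = [row[:] for row in input_grid]
--
--     rows = len(input_grid)
--     cols = len(input_grid[0])
--
--     # Find all colored cells (non-zero)
--     colored_cells = []
--     for r in range(rows):
--         for c in range(cols):
--             if input_grid[r][c] != 0:
--                 colored_cells.append((r, c, input_grid[r][c]))
--
--     # For each colored cell, create alternating pattern to the right
--     for r, start_c, color in colored_cells: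
--         # Start from the original column position
--         current_col = start_c
--         use_color = True  # Start with the original color
--
--         while current_col < cols:
--             if use_color:
--                 output[r][current_col] = color
--             else:
--                 output[r][current_col] = 5  # Grey
--
--             use_color = not use_color
--             current_col += 1
--
--     return output
-- ===== SOURCE B (Python) =====
-- def transform(input_grid: list[list[int]]) -> list[list[int]]:
--     # One left-to-right scan per row over the grid's cols = len(row 0) columns,
--     # tracking the most recent color and the alternation parity.
--     cols = len(input_grid[0])
--     result = []
--     for row in input_grid:
--         new_row = []
--         color = None
--         parity = False  # True -> next non-colored cell gets grey (5)
--         for v in row[:cols]: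
--             if v != 0:
--                 color, parity = v, True
--                 new_row.append(v)
--             elif color is None:
--                 new_row.append(v)
--             else:
--                 new_row.append(5 if parity else color)
--                 parity = not parity
--         new_row.extend(row[cols:])
--         result.append(new_row)
--     return result
-- ===== Notes on version B (the rewrite author's own statement) =====
-- stated objective: faster
-- what changed: Instead of collecting all colored cells and re-filling the row to the right of each one (each colored cell rewrites up to C cells), B makes a single left-to-right scan of each row's cols columns, tracking the last seen color and the alternation parity.
import Mathlib
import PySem

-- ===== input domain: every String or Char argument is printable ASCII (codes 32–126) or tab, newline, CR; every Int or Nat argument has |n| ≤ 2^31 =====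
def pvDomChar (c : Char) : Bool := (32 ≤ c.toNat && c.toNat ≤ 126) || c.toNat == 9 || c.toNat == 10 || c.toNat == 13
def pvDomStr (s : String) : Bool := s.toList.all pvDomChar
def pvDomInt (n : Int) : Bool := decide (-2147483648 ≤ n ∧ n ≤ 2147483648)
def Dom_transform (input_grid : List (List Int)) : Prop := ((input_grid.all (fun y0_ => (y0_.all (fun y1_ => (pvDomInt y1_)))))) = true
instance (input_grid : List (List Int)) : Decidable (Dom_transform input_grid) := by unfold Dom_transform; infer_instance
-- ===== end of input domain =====

-- B replaces A's per-colored-cell rightward refill passes by a single stateful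
-- left-to-right scan of each row (objective: faster).

-- ===== PORT A =====
-- the `while current_col < cols` fill loop of A
def fillLoop (out : List Int) (cols : Nat) (cur : Nat) (useColor : Bool) (color : Int) : List Int :=
  if cur < cols then
    fillLoop (out.set cur (if useColor then color else 5)) cols (cur + 1) (!useColor) color
  else out
termination_by cols - cur
decreasing_by omega

def transform (input_grid : List (List Int)) : List (List Int) :=
  let output := input_grid.map (fun row => row)
  let rows := input_grid.length
  let cols := (PySem.List.pyGetD input_grid 0 []).length
  let colored := (List.range rows).foldl (fun acc r =>
    (List.range cols).foldl (fun acc c =>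
      let v := PySem.List.pyGetD (PySem.List.pyGetD input_grid (Int.ofNat r) []) (Int.ofNat c) 0
      if v ≠ 0 then acc ++ [(r, c, v)] else acc) acc) ([] : List (Nat × Nat × Int))
  colored.foldl (fun out rcv =>
    out.set rcv.1 (fillLoop (out.getD rcv.1 []) cols rcv.2.1 true rcv.2.2)) output

-- ===== PORT B =====
-- the inner `for v in row[:cols]` state-machine loop of B
def scanRow : List Int → Option Int → Bool → List Int
  | [], _, _ => []
  | v :: rest, color, parity =>
    if v ≠ 0 then v :: scanRow rest (some v) true
    else match color with
      | none => v :: scanRow rest none parity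
      | some col => (if parity then 5 else col) :: scanRow rest (some col) (!parity)

def transform_alt (input_grid : List (List Int)) : List (List Int) :=
  let cols := (input_grid.headD []).length
  input_grid.map (fun row => scanRow (row.take cols) none false ++ row.drop cols)

-- ===== PRECONDITION & SPEC =====
-- Pre_ excludes exactly the inputs where the Python A raises IndexError:
-- the empty grid, and grids with a row shorter than row 0.
def Pre_transform (input_grid : List (List Int)) : Prop :=
  input_grid ≠ [] ∧ ∀ row ∈ input_grid, (input_grid.headD []).length ≤ row.length
instance (input_grid : List (List Int)) : Decidable (Pre_transform input_grid) := by
  unfold Pre_transform; infer_instance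
def pvWitness_transform : List (List Int) := [[1, 0, 0], [0, 2, 0]]

def Spec_transform (input_grid : List (List Int)) (out : List (List Int)) : Prop := out = transform_alt input_grid
instance (input_grid : List (List Int)) (out : List (List Int)) : Decidable (Spec_transform input_grid out) := by unfold Spec_transform; infer_instance

-- ===== CLAIM (what is proved, stated in full; the proofs are below) =====
def Claim_equal_transform : Prop := ∀ (input_grid : List (List Int)), Dom_transform input_grid → Pre_transform input_grid → Spec_transform input_grid (transform input_grid)

-- ===== LEMMAS AND PROOFS =====

def lastNZ : List Int → Option (Nat × Int)
  | [] => none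
  | v :: rest => match lastNZ rest with
    | some p => some (p.1 + 1, p.2)
    | none => if v ≠ 0 then some (0, v) else none

def cellSt (row : List Int) (color : Option Int) (parity : Bool) (j : Nat) : Int :=
  match lastNZ (row.take (j + 1)) with
  | some p => if (j - p.1) % 2 = 0 then p.2 else 5
  | none => match color with
    | none => row.getD j 0
    | some col => if (parity != decide (j % 2 = 1)) then 5 else col

theorem scanRow_length (row : List Int) : ∀ color parity, (scanRow row color parity).length = row.length := by
  induction row with
  | nil => intro _ _; rfl
  | cons v rest ih =>
    intro color parity
    simp only [scanRow]
    split_ifs <;> cases color <;> simp [ih]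

theorem fillLoop_length (out : List Int) (cols cur : Nat) (u : Bool) (color : Int) :
    (fillLoop out cols cur u color).length = out.length := by
  induction out, cur, u using fillLoop.induct cols color with
  | case1 out cur u h ih => rw [fillLoop]; simp only [if_pos h]; simp only [dite_eq_ite] at ih; rw [ih]; simp
  | case2 out cur u h => rw [fillLoop]; simp only [if_neg h]

theorem fillLoop_getD_untouched (out : List Int) (cols cur : Nat) (u : Bool) (color : Int)
    (j : Nat) (h : j < cur ∨ cols ≤ j) :
    (fillLoop out cols cur u color).getD j 0 = out.getD j 0 := by
  induction out, cur, u using fillLoop.induct cols color with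
  | case1 out cur u hc ih =>
    rw [fillLoop]; simp only [if_pos hc]
    simp only [dite_eq_ite] at ih
    rw [ih (by omega)]
    have hne : cur ≠ j := by omega
    simp [List.getD, List.getElem?_set_ne hne]
  | case2 out cur u hc => rw [fillLoop]; simp only [if_neg hc]

theorem fillLoop_getD (out : List Int) (cols cur : Nat) (u : Bool) (color : Int)
    (j : Nat) (h1 : cur ≤ j) (h2 : j < cols) (h3 : cols ≤ out.length) :
    (fillLoop out cols cur u color).getD j 0 =
      if (j - cur) % 2 = 0 then (if u then color else 5) else (if u then 5 else color) := by
  induction out, cur, u using fillLoop.induct cols color with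
  | case1 out cur u hc ih =>
    rw [fillLoop]; simp only [if_pos hc]
    simp only [dite_eq_ite] at ih
    rcases Nat.eq_or_lt_of_le h1 with he | hlt
    · subst he
      rw [fillLoop_getD_untouched _ _ _ _ _ _ (Or.inl (Nat.lt_succ_self cur))]
      have : cur < out.length := by omega
      simp [List.getD, this]
    · rw [ih hlt (by simpa using h3)]
      have hpar : (j - (cur + 1)) % 2 = 0 ↔ ¬ (j - cur) % 2 = 0 := by omega
      by_cases hp : (j - cur) % 2 = 0
      · have h4 : ¬ (j - (cur + 1)) % 2 = 0 := by omega
        simp [hp, h4]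
        cases u <;> simp
      · simp [hp, (by omega : (j - (cur+1)) % 2 = 0)]
        cases u <;> simp
  | case2 out cur u hc => omega

theorem scanRow_getD (row : List Int) : ∀ color parity j, j < row.length →
    (scanRow row color parity).getD j 0 = cellSt row color parity j := by
  induction row with
  | nil => intro _ _ j h; simp at h
  | cons v rest ih =>
    intro color parity j hj
    by_cases h : v = 0
    · -- v = 0
      subst h
      match j with
      | 0 =>
        simp only [scanRow, cellSt, List.take_succ_cons, List.take_zero, lastNZ]
        simp only [ne_eq, not_true_eq_false, if_false]
        cases color with
        | none => simp
        | some col => cases parity <;> simp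
      | j + 1 =>
        have hj' : j < rest.length := by simpa using hj
        simp only [scanRow, cellSt, List.take_succ_cons, lastNZ, ne_eq, not_true_eq_false,
          if_false]
        cases color with
        | none =>
          rw [List.getD_cons_succ, ih none parity j hj']
          simp only [cellSt]
          cases hnz : lastNZ (rest.take (j + 1)) with
          | some p => simp [Nat.succ_sub_succ]
          | none => simp
        | some col =>
          rw [List.getD_cons_succ, ih (some col) (!parity) j hj']
          simp only [cellSt]
          cases hnz : lastNZ (rest.take (j + 1)) with
          | some p => simp [Nat.succ_sub_succ]
          | none =>
            have heq : (!parity != decide (j % 2 = 1)) = (parity != decide ((j + 1) % 2 = 1)) := by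
              have h2 : ((j + 1) % 2 = 1) ↔ ¬ (j % 2 = 1) := by omega
              by_cases hp : j % 2 = 1 <;> cases parity <;> simp [hp, h2]
            simp [heq]
    · -- v ≠ 0
      match j with
      | 0 =>
        simp only [scanRow, cellSt, List.take_succ_cons, List.take_zero, lastNZ]
        simp [h]
      | j + 1 =>
        have hj' : j < rest.length := by simpa using hj
        simp only [scanRow, cellSt, List.take_succ_cons, lastNZ, ne_eq, h,
          not_false_eq_true, if_true]
        rw [List.getD_cons_succ, ih (some v) true j hj']
        simp only [cellSt]
        cases hnz : lastNZ (rest.take (j + 1)) with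
        | some p => simp [Nat.succ_sub_succ]
        | none =>
          by_cases hp : j % 2 = 1
          · simp [hp]
            all_goals (intro hx; omega)
          · simp [hp]
            all_goals (intro hx; omega)

def fillStep (cols : Nat) (acc : List Int) (p : Nat × Int) : List Int :=
  fillLoop acc cols p.1 true p.2

theorem foldFill_length (cols : Nat) (L : List (Nat × Int)) : ∀ acc,
    (L.foldl (fillStep cols) acc).length = acc.length := by
  induction L with
  | nil => intro acc; rfl
  | cons p L ih => intro acc; simp only [List.foldl_cons]; rw [ih, fillStep, fillLoop_length]

theorem foldFill_getD_ge (cols : Nat) (L : List (Nat × Int)) (acc : List Int) (j : Nat)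
    (hj : cols ≤ j) :
    (L.foldl (fillStep cols) acc).getD j 0 = acc.getD j 0 := by
  induction L generalizing acc with
  | nil => rfl
  | cons p L ih =>
    simp only [List.foldl_cons]
    rw [ih, fillStep, fillLoop_getD_untouched _ _ _ _ _ _ (Or.inr hj)]

theorem foldFill_getD (cols : Nat) (L : List (Nat × Int)) (acc : List Int) (j : Nat)
    (hlen : cols ≤ acc.length) (hj : j < cols) :
    (L.foldl (fillStep cols) acc).getD j 0 =
      match (L.filter (fun p => p.1 ≤ j)).getLast? with
      | some p => if (j - p.1) % 2 = 0 then p.2 else 5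
      | none => acc.getD j 0 := by
  induction L using List.reverseRecOn with
  | nil => rfl
  | append_singleton L p ih =>
    rw [List.foldl_append, List.foldl_cons, List.foldl_nil, List.filter_append]
    by_cases hp : p.1 ≤ j
    · rw [fillStep, fillLoop_getD _ _ _ _ _ _ hp hj (by rw [foldFill_length]; exact hlen)]
      simp [hp]
    · have h1 : j < p.1 := by omega
      rw [fillStep, fillLoop_getD_untouched _ _ _ _ _ _ (Or.inl h1)]
      rw [ih]
      simp [hp]

def rowColored (row : List Int) (cols : Nat) : List (Nat × Int) :=
  (List.range cols).foldl (fun acc c => if row.getD c 0 ≠ 0 then acc ++ [(c, row.getD c 0)] else acc) []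

theorem lastNZ_concat (xs : List Int) (v : Int) :
    lastNZ (xs ++ [v]) = if v ≠ 0 then some (xs.length, v) else lastNZ xs := by
  induction xs with
  | nil => rfl
  | cons x xs ih =>
    simp only [List.cons_append, lastNZ, ih]
    by_cases hv : v = 0
    · simp [hv]
    · simp [hv]

theorem rowColored_succ (row : List Int) (n : Nat) :
    rowColored row (n + 1) = rowColored row n ++ (if row.getD n 0 ≠ 0 then [(n, row.getD n 0)] else []) := by
  rw [rowColored, rowColored, List.range_succ, List.foldl_append, List.foldl_cons, List.foldl_nil]
  split_ifs <;> simp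

theorem rowColored_filter_getLast (row : List Int) (n : Nat) (hn : n ≤ row.length) (j : Nat) :
    ((rowColored row n).filter (fun p => p.1 ≤ j)).getLast? = lastNZ (row.take (min (j + 1) n)) := by
  induction n with
  | zero => simp [rowColored, lastNZ]
  | succ n ih =>
    rw [rowColored_succ, List.filter_append]
    have hn' : n ≤ row.length := by omega
    have htake : row.take (n + 1) = row.take n ++ [row.getD n 0] := by
      rw [List.take_add_one]
      congr 1
      have : n < row.length := by omega
      simp [List.getD, this]
    by_cases hj : n ≤ j
    · have hmin : min (j + 1) (n + 1) = n + 1 := by omega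
      rw [hmin, htake, lastNZ_concat]
      by_cases hz : row.getD n 0 = 0
      · simp only [hz, ne_eq, not_true_eq_false, if_false, List.filter_nil, List.append_nil]
        rw [ih hn']
        have hmn : min (j + 1) n = n := by omega
        rw [hmn]
      · have hlen : (row.take n).length = n := by simp [hn']
        have hfil : List.filter (fun p => decide (p.1 ≤ j)) [(n, row.getD n 0)] = [(n, row.getD n 0)] := by
          simp [hj]
        rw [if_pos hz, hfil, List.getLast?_concat, if_pos hz, hlen]
    · have hmin : min (j + 1) (n + 1) = min (j + 1) n := by omega
      rw [hmin, ← ih hn']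
      have : List.filter (fun p => decide (p.1 ≤ j)) (if row.getD n 0 ≠ 0 then [(n, row.getD n 0)] else []) = [] := by
        split_ifs <;> simp [hj]
      rw [this, List.append_nil]

theorem row_eq (cols : Nat) (row : List Int) (h : cols ≤ row.length) :
    (rowColored row cols).foldl (fillStep cols) row = scanRow (row.take cols) none false ++ row.drop cols := by
  have hlt : (row.take cols).length = cols := by simp [h]
  apply List.ext_getElem
  · simp [foldFill_length, scanRow_length, hlt, h]
  · intro j hj1 hj2
    have hj' : j < row.length := by rwa [foldFill_length] at hj1
    rw [← List.getD_eq_getElem _ 0 hj1, ← List.getD_eq_getElem _ 0 hj2]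
    by_cases hc : j < cols
    · rw [foldFill_getD cols _ _ _ h hc, rowColored_filter_getLast row cols h j]
      have hmn : min (j + 1) cols = j + 1 := by omega
      rw [hmn]
      have hga : (scanRow (List.take cols row) none false ++ List.drop cols row).getD j 0
          = (scanRow (List.take cols row) none false).getD j 0 := by
        have hl : j < (scanRow (List.take cols row) none false).length := by
          rw [scanRow_length, hlt]; exact hc
        simp [List.getD, List.getElem?_append_left hl]
      rw [hga, scanRow_getD _ _ _ _ (by rw [hlt]; exact hc)]
      rw [cellSt, List.take_take, (by omega : min (j + 1) cols = j + 1)]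
      cases hnz : lastNZ (row.take (j + 1)) with
      | some p => simp
      | none => simp [List.getD, List.getElem?_take_of_lt hc]
    · rw [foldFill_getD_ge cols _ _ _ (by omega)]
      have hgb : (scanRow (List.take cols row) none false ++ List.drop cols row).getD j 0
          = row.getD j 0 := by
        have hl : (scanRow (List.take cols row) none false).length ≤ j := by
          rw [scanRow_length, hlt]; omega
        simp [List.getD, List.getElem?_append_right hl, scanRow_length, hlt,
          List.getElem?_drop, (by omega : cols + (j - cols) = j)]
      rw [hgb]

def gStep (cols : Nat) (out : List (List Int)) (rcv : Nat × Nat × Int) : List (List Int) :=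
  out.set rcv.1 (fillLoop (out.getD rcv.1 []) cols rcv.2.1 true rcv.2.2)

theorem gFold_length (cols : Nat) (L : List (Nat × Nat × Int)) : ∀ out,
    (L.foldl (gStep cols) out).length = out.length := by
  induction L with
  | nil => intro out; rfl
  | cons p L ih => intro out; simp only [List.foldl_cons]; rw [ih, gStep, List.length_set]

theorem tagFold (cols : Nat) (r : Nat) (ps : List (Nat × Int)) : ∀ (out : List (List Int)), r < out.length →
    ((ps.map (fun p => (r, p))).foldl (gStep cols) out)
      = out.set r (ps.foldl (fillStep cols) (out.getD r [])) := by
  induction ps with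
  | nil =>
    intro out hr
    have : out.getD r [] = out[r] := List.getD_eq_getElem out [] hr
    simp only [List.map_nil, List.foldl_nil, this]
    exact (List.set_getElem_self hr).symm
  | cons p ps ih =>
    intro out hr
    simp only [List.map_cons, List.foldl_cons]
    have hstep : gStep cols out (r, p) = out.set r (fillStep cols (out.getD r []) p) := rfl
    rw [hstep, ih _ (by simpa using hr), List.set_set]
    congr 1
    congr 1
    simp [List.getD, hr]

theorem gridFold (cols : Nat) (F : Nat → List (Nat × Int)) (rs : List Nat) (out : List (List Int)) (r0 : Nat)
    (hnd : rs.Nodup) (hlt : ∀ r ∈ rs, r < out.length) :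
    ((rs.flatMap (fun r => (F r).map (fun p => (r, p)))).foldl (gStep cols) out).getD r0 []
      = if r0 ∈ rs then (F r0).foldl (fillStep cols) (out.getD r0 []) else out.getD r0 [] := by
  induction rs using List.reverseRecOn generalizing out with
  | nil => simp
  | append_singleton rs r ih =>
    rw [List.flatMap_append, List.foldl_append]
    have hnd' : rs.Nodup := (List.nodup_append.mp hnd).1
    have hrmem : r ∉ rs := by
      simp [List.nodup_append] at hnd
      tauto
    have hlt' : ∀ a ∈ rs, a < out.length := fun a ha => hlt a (List.mem_append_left _ ha)
    have hrlt : r < (List.foldl (gStep cols) out (rs.flatMap fun r => (F r).map fun p => (r, p))).length := by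
      rw [gFold_length]; exact hlt r (List.mem_append_right _ (List.mem_singleton_self r))
    simp only [List.flatMap_singleton]
    rw [tagFold cols r (F r) _ hrlt]
    by_cases he : r0 = r
    · subst he
      rw [List.getD_eq_getElem _ [] (by simpa using hrlt), List.getElem_set_self (by simpa using hrlt)]
      rw [ih out hnd' hlt', if_neg hrmem]
      simp [List.mem_append]
    · have hne : r ≠ r0 := fun hx => he hx.symm
      have hset : ∀ (xs : List (List Int)) (X : List Int), (xs.set r X).getD r0 [] = xs.getD r0 [] := by
        intro xs X; simp [List.getD, List.getElem?_set_ne hne]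
      rw [hset, ih out hnd' hlt']
      simp [List.mem_append, he]

theorem inner_eq (g : List (List Int)) (r : Nat) (cols : Nat) : ∀ acc,
    (List.range cols).foldl (fun acc c =>
      let v := PySem.List.pyGetD (PySem.List.pyGetD g (Int.ofNat r) []) (Int.ofNat c) 0
      if v ≠ 0 then acc ++ [(r, c, v)] else acc) acc
    = acc ++ (rowColored (g.getD r []) cols).map (fun p => (r, p.1, p.2)) := by
  have hrow : PySem.List.pyGetD g (Int.ofNat r) [] = g.getD r [] := PySem.List.pyGetD_natCast g r []
  induction cols with
  | zero => intro acc; simp [rowColored]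
  | succ n ih =>
    intro acc
    rw [List.range_succ, List.foldl_append, List.foldl_cons, List.foldl_nil, ih, rowColored_succ,
      List.map_append]
    simp only [hrow]
    by_cases hz : (g.getD r []).getD n 0 = 0
    · simp [List.getD] at hz; simp [hz]
    · simp [List.getD] at hz; simp [hz]

theorem colored_eq (g : List (List Int)) (cols : Nat) :
    (List.range g.length).foldl (fun acc r =>
      (List.range cols).foldl (fun acc c =>
        let v := PySem.List.pyGetD (PySem.List.pyGetD g (Int.ofNat r) []) (Int.ofNat c) 0
        if v ≠ 0 then acc ++ [(r, c, v)] else acc) acc) ([] : List (Nat × Nat × Int))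
    = (List.range g.length).flatMap (fun r => (rowColored (g.getD r []) cols).map (fun p => (r, p.1, p.2))) := by
  suffices h : ∀ n acc, (List.range n).foldl (fun acc r =>
      (List.range cols).foldl (fun acc c =>
        let v := PySem.List.pyGetD (PySem.List.pyGetD g (Int.ofNat r) []) (Int.ofNat c) 0
        if v ≠ 0 then acc ++ [(r, c, v)] else acc) acc) acc
      = acc ++ (List.range n).flatMap (fun r => (rowColored (g.getD r []) cols).map (fun p => (r, p.1, p.2))) by
    simpa using h g.length []
  intro n
  induction n with
  | zero => intro acc; simp
  | succ n ih =>
    intro acc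
    rw [List.range_succ, List.foldl_append, List.foldl_cons, List.foldl_nil, ih, inner_eq,
      List.flatMap_append]
    simp

theorem transform_eq (g : List (List Int)) (hne : g ≠ [])
    (hrows : ∀ row ∈ g, (g.headD []).length ≤ row.length) : transform g = transform_alt g := by
  have hget0 : (PySem.List.pyGetD g 0 []).length = (g.headD []).length := by
    cases g with
    | nil => simp at hne
    | cons h t => simp [PySem.List.pyGetD_ofNat']
  have hA : transform g = ((List.range g.length).flatMap
      (fun r => (rowColored (g.getD r []) (g.headD []).length).map (fun p => (r, p)))).foldl
      (gStep (g.headD []).length) g := by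
    unfold transform
    simp only [List.map_id']
    rw [hget0, colored_eq g (g.headD []).length]
    rfl
  have hB : transform_alt g = g.map (fun row =>
      scanRow (row.take (g.headD []).length) none false ++ row.drop (g.headD []).length) := rfl
  rw [hA, hB]
  apply List.ext_getElem
  · rw [gFold_length]; simp
  · intro r h1 h2
    have hr : r < g.length := by simpa using h2
    rw [← List.getD_eq_getElem _ [] h1, ← List.getD_eq_getElem _ [] h2]
    rw [gridFold _ _ _ _ _ (List.nodup_range) (by intro a ha; simpa using ha)]
    rw [if_pos (List.mem_range.mpr hr)]
    have hmap : (g.map (fun row =>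
        scanRow (row.take (g.headD []).length) none false ++ row.drop (g.headD []).length)).getD r []
        = scanRow ((g.getD r []).take (g.headD []).length) none false
          ++ (g.getD r []).drop (g.headD []).length := by
      simp [List.getD, List.getElem?_map, List.getElem?_eq_getElem hr]
    rw [hmap]
    exact row_eq _ (g.getD r []) (hrows _ (by
      rw [List.getD_eq_getElem _ [] hr]; exact List.getElem_mem hr))

-- ===== VERDICT (by name: the statement is the Claim_ definition above) =====
theorem transform_spec : Claim_equal_transform := by
  intro g _hdom hpre
  unfold Spec_transform
  exact transform_eq g hpre.1 hpre.2
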